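-- pv_equiv track=rewrite | github.com/LOGO-CUHKSZ/W2SAT | tools/unsat_break.py | unsatcore_detect
-- ===== SOURCE A (Python) =====
-- def unsatcore_detect (vars_num, sat):
--     sat_set = dict()
--     unsat_cores = []
--     for i, clause in enumerate(sat):
--         sat_set[tuple(clause)] = i
--     for index, clause in enumerate(sat):
--         len_clause = len(clause)
--         state_number = 1 << len_clause
--         new_clause = clause.copy()
--         flag = 1
--         unsat_core = []
--         for state in range(state_number): # e.g. for clause(1,2,3), enumerate the sign of it, in total 8 cases.
--             for i in range(len_clause):
--                 new_clause[i] = clause[i] if state >> i & 1 else -clause[i]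
--             if tuple(new_clause) not in sat_set:
--                 flag = 0
--                 break
--             unsat_core.append(sat_set[tuple(new_clause)])
--         if flag:
--             unsat_cores.append(sorted(unsat_core))
--             for i in unsat_core:
--                 del sat_set[tuple(sat[i])]
--     return unsat_cores
-- ===== SOURCE B (Python) =====
-- def unsatcore_detect(vars_num, sat):
--     # Bucket distinct clauses by their absolute-value pattern; a group is an
--     # unsat core iff it contains all 2^k sign variants, i.e. its bucket is full.
--     sat_set = {}
--     for i, clause in enumerate(sat):
--         sat_set[tuple(clause)] = i
--     groups = {}
--     for t in sat_set:
--         groups.setdefault(tuple(abs(x) for x in t), []).append(t)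
--     unsat_cores = []
--     emitted = set()
--     for clause in sat:
--         key = tuple(abs(x) for x in clause)
--         if key in emitted:
--             continue
--         members = groups[key]
--         if len(members) == 1 << len(key):
--             unsat_cores.append(sorted(sat_set[t] for t in members))
--             emitted.add(key)
--     return unsat_cores
-- ===== Notes on version B (the rewrite author's own statement) =====
-- stated objective: alternative
-- what changed: B buckets the distinct clauses once by their absolute-value pattern and detects a complete sign-variation group by comparing the bucket size with 2^k, instead of A's per-clause enumeration of all 2^k sign variants with repeated dictionary lookups and deletions.
-- crash fix: On inputs where some clause contains the literal 0 (invalid in DIMACS) and its full sign-variant group is present, A raises KeyError (since -0 == 0, a duplicate index lands in unsat_core and the second del fails) while B returns the remaining unsat cores. — e.g. on unsatcore_detect(1, [[0]]): A raises KeyError, B returns []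
import Mathlib
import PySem

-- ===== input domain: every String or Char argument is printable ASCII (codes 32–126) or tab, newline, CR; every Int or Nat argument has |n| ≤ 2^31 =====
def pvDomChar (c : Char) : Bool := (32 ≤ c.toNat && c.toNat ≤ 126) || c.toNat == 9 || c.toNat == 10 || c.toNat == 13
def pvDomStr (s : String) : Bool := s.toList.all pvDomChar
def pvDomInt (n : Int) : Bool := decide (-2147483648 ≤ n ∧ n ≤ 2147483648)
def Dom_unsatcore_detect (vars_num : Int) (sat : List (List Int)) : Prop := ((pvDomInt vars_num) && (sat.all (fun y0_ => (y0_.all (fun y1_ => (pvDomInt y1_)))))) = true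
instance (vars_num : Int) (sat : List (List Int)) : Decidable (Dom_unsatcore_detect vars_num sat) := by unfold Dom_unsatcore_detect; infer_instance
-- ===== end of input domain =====

-- B buckets the distinct clauses by absolute-value pattern once and checks each bucket's size
-- against 2^k, instead of A's per-clause enumeration of all 2^k sign variants with deletions
-- from the clause dictionary (objective: alternative — a bucketing pass replaces the per-clause
-- sign enumeration; same measured cost on random inputs).

-- ===== PORT A =====
-- new_clause after the inner `for i in range(len_clause)` loop: position i holds
-- clause[i] if bit i of state is set, else -clause[i]  (state ≥ 0, so Nat.testBit is exact)
def pvVariant (clause : List Int) (state : Nat) : List Int :=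
  (List.range clause.length).map (fun i => if state.testBit i then clause.getD i 0 else -(clause.getD i 0))

-- the `for state in range(state_number)` loop: break with flag = 0 ↦ none,
-- normal exit ↦ some unsat_core
def pvAStates (d : PySem.Dict (List Int) Int) (clause : List Int) :
    List Nat → List Int → Option (List Int)
  | [], core => some core
  | s :: rest, core =>
    match d.get? (pvVariant clause s) with
    | none => none
    | some j => pvAStates d clause rest (core ++ [j])

def unsatcore_detect (vars_num : Int) (sat : List (List Int)) : List (List Int) :=
  let sat_set := (PySem.List.enumerate sat).foldl
    (fun (d : PySem.Dict (List Int) Int) p => d.insert p.2 p.1) PySem.Dict.empty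
  -- `del sat_set[tuple(sat[i])]`: i is an index stored by enumerate, so sat[i] never raises;
  -- (pyGet? sat i).getD [] is exact there
  ((PySem.List.enumerate sat).foldl
    (fun (st : PySem.Dict (List Int) Int × List (List Int)) p =>
      match pvAStates st.1 p.2 (List.range (2 ^ p.2.length)) [] with
      | none => st
      | some core =>
          (core.foldl (fun d' i => d'.erase ((PySem.List.pyGet? sat i).getD [])) st.1,
           st.2 ++ [PySem.List.sorted core (fun x => x)]))
    (sat_set, [])).2

-- ===== PORT B =====
-- tuple(abs(x) for x in t)
def pvKeyB (c : List Int) : List Int := c.map (fun x => |x|)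

def unsatcore_detect_alt (vars_num : Int) (sat : List (List Int)) : List (List Int) :=
  let sat_set := (PySem.List.enumerate sat).foldl
    (fun (d : PySem.Dict (List Int) Int) p => d.insert p.2 p.1) PySem.Dict.empty
  -- groups.setdefault(key, []).append(t)
  let groups := sat_set.keys.foldl
    (fun (g : PySem.Dict (List Int) (List (List Int))) t =>
      g.insert (pvKeyB t) (g.getD (pvKeyB t) [] ++ [t])) PySem.Dict.empty
  -- groups[key] and sat_set[t] never raise (key/t always present): getD is exact there
  (sat.foldl
    (fun (st : List (List Int) × PySem.Set (List Int)) clause =>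
      let key := pvKeyB clause
      if PySem.Set.contains st.2 key then st
      else
        let members : List (List Int) := PySem.Dict.getD groups key []
        if members.length == 2 ^ key.length then
          (st.1 ++ [PySem.List.sorted (members.map (fun t => sat_set.getD t 0)) (fun x => x)],
           PySem.Set.add st.2 key)
        else st)
    ([], PySem.Set.empty)).1

-- ===== PRECONDITION & SPEC =====
-- Pre_ is exactly the set of inputs on which A returns normally: A raises KeyError iff some
-- clause contains the literal 0 (invalid in DIMACS, where 0 terminates a clause) and its full
-- sign-variant group is present — then -0 == 0 puts a duplicate index into unsat_core and the
-- second `del sat_set[...]` fails.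
def Pre_unsatcore_detect (vars_num : Int) (sat : List (List Int)) : Prop :=
  ∀ cl ∈ sat, (0 : Int) ∈ cl → ∃ s < 2 ^ cl.length,
    ((List.range cl.length).map
      (fun i => if (s : Nat).testBit i then cl.getD i 0 else -(cl.getD i 0))) ∉ sat
instance (vars_num : Int) (sat : List (List Int)) : Decidable (Pre_unsatcore_detect vars_num sat) := by unfold Pre_unsatcore_detect; infer_instance

def pvWitness_unsatcore_detect : Int × List (List Int) :=
  (2, [[1, 2], [-1, 2], [1, -2], [-1, -2], [2]])

-- On inputs with a 0-literal clause whose sign-variant group is complete, A raises KeyError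
-- (duplicate delete) while B returns the remaining unsat cores.
def Raises_unsatcore_detect (vars_num : Int) (sat : List (List Int)) : Prop :=
  ∃ cl ∈ sat, (0 : Int) ∈ cl ∧ ∀ s < 2 ^ cl.length,
    ((List.range cl.length).map
      (fun i => if (s : Nat).testBit i then cl.getD i 0 else -(cl.getD i 0))) ∈ sat
instance (vars_num : Int) (sat : List (List Int)) : Decidable (Raises_unsatcore_detect vars_num sat) := by unfold Raises_unsatcore_detect; infer_instance

def pvRaiseWitness_unsatcore_detect : Int × List (List Int) := (1, [[0]])
def pvRaiseWitnessOut_unsatcore_detect : List (List Int) := []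

def Spec_unsatcore_detect (vars_num : Int) (sat : List (List Int)) (out : List (List Int)) : Prop := out = unsatcore_detect_alt vars_num sat
instance (vars_num : Int) (sat : List (List Int)) (out : List (List Int)) : Decidable (Spec_unsatcore_detect vars_num sat out) := by unfold Spec_unsatcore_detect; infer_instance

-- ===== CLAIM (what is proved, stated in full; the proofs are below) =====
def Claim_equal_unsatcore_detect : Prop := ∀ (vars_num : Int) (sat : List (List Int)), Dom_unsatcore_detect vars_num sat → Pre_unsatcore_detect vars_num sat → Spec_unsatcore_detect vars_num sat (unsatcore_detect vars_num sat)

def Claim_raises_unsatcore_detect : Prop := (∀ (vars_num : Int) (sat : List (List Int)), Dom_unsatcore_detect vars_num sat → Raises_unsatcore_detect vars_num sat → ¬ Pre_unsatcore_detect vars_num sat) ∧ (Dom_unsatcore_detect (pvRaiseWitness_unsatcore_detect.1) (pvRaiseWitness_unsatcore_detect.2) ∧ Raises_unsatcore_detect (pvRaiseWitness_unsatcore_detect.1) (pvRaiseWitness_unsatcore_detect.2) ∧ unsatcore_detect_alt (pvRaiseWitness_unsatcore_detect.1) (pvRaiseWitness_unsatcore_detect.2) = pvRaiseWitnessOut_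unsatcore_detect)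

-- ===== LEMMAS AND PROOFS =====

-- proof-side names for the two ports' data structures
def pvD0 (sat : List (List Int)) : PySem.Dict (List Int) Int :=
  (PySem.List.enumerate sat).foldl
    (fun (d : PySem.Dict (List Int) Int) p => d.insert p.2 p.1) PySem.Dict.empty

def pvGroups (sat : List (List Int)) : PySem.Dict (List Int) (List (List Int)) :=
  (pvD0 sat).keys.foldl
    (fun (g : PySem.Dict (List Int) (List (List Int))) t =>
      g.insert (pvKeyB t) (g.getD (pvKeyB t) [] ++ [t])) PySem.Dict.empty

def pvStepA (sat : List (List Int)) (st : PySem.Dict (List Int) Int × List (List Int))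
    (cl : List Int) : PySem.Dict (List Int) Int × List (List Int) :=
  match pvAStates st.1 cl (List.range (2 ^ cl.length)) [] with
  | none => st
  | some core =>
      (core.foldl (fun d' i => d'.erase ((PySem.List.pyGet? sat i).getD [])) st.1,
       st.2 ++ [PySem.List.sorted core (fun x => x)])

def pvStepB (sat : List (List Int)) (st : List (List Int) × PySem.Set (List Int))
    (cl : List Int) : List (List Int) × PySem.Set (List Int) :=
  if PySem.Set.contains st.2 (pvKeyB cl) then st
  else
    if ((pvGroups sat).getD (pvKeyB cl) []).length == 2 ^ (pvKeyB cl).length then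
      (st.1 ++ [PySem.List.sorted (((pvGroups sat).getD (pvKeyB cl) []).map
          (fun t => (pvD0 sat).getD t 0)) (fun x => x)],
       PySem.Set.add st.2 (pvKeyB cl))
    else st

def pvVariants (cl : List Int) : List (List Int) := (List.range (2 ^ cl.length)).map (pvVariant cl)

def pvMembers (sat : List (List Int)) (cl : List Int) : List (List Int) :=
  (pvD0 sat).keys.filter (fun t => pvKeyB t == pvKeyB cl)

theorem pvFoldl_enumerate_snd {β : Type} (g : β → List Int → β) (xs : List (List Int)) (init : β) :
    (PySem.List.enumerate xs).foldl (fun st p => g st p.2) init = xs.foldl g init := by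
  conv_rhs => rw [← PySem.List.map_snd_enumerate xs 0]
  rw [List.foldl_map]

theorem pvPortA_eq (vars_num : Int) (sat : List (List Int)) :
    unsatcore_detect vars_num sat = (sat.foldl (pvStepA sat) (pvD0 sat, [])).2 := by
  unfold unsatcore_detect
  rw [← pvFoldl_enumerate_snd (pvStepA sat) sat (pvD0 sat, [])]
  rfl

theorem pvPortB_eq (vars_num : Int) (sat : List (List Int)) :
    unsatcore_detect_alt vars_num sat = (sat.foldl (pvStepB sat) ([], PySem.Set.empty)).1 := by
  rfl

theorem pvD0_concat (xs : List (List Int)) (x : List Int) :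
    pvD0 (xs ++ [x]) = (pvD0 xs).insert x (xs.length : Int) := by
  unfold pvD0
  rw [PySem.List.enumerate_append, List.foldl_append]
  simp [PySem.List.enumerate_cons, PySem.List.enumerate_nil]

theorem pvNodup_keys_pvD0 (sat : List (List Int)) : (pvD0 sat).keys.Nodup := by
  unfold pvD0
  exact PySem.Dict.nodup_keys_foldl_insert_key (PySem.List.enumerate sat 0)
    (fun (p : Int × List Int) => p.2) (fun _ p => p.1) PySem.Dict.empty
    PySem.Dict.nodup_keys_empty

theorem pvGet?_pvD0_spec (sat : List (List Int)) (t : List Int) (i : Int)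
    (h : (pvD0 sat).get? t = some i) : ∃ n : Nat, i = (n : Int) ∧ sat[n]? = some t := by
  induction sat using List.reverseRecOn with
  | nil => simp [pvD0, PySem.List.enumerate_nil, PySem.Dict.get?_empty] at h
  | append_singleton xs x ih =>
      rw [pvD0_concat, PySem.Dict.get?_insert] at h
      by_cases hx : t = x
      · simp [hx] at h
        exact ⟨xs.length, by omega, by simp [hx]⟩
      · simp [hx] at h
        obtain ⟨n, hn, hget⟩ := ih h
        exact ⟨n, hn, by rw [List.getElem?_append_left (by
          exact (List.getElem?_eq_some_iff.mp hget).1)]; exact hget⟩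

-- Python `del` / lookup after deletions
theorem pvFind?_filter (k t : List Int) (l : List ((List Int) × Int)) :
    (l.filter (fun p => !(p.1 == k))).find? (fun p => p.1 == t) =
      if t = k then none else l.find? (fun p => p.1 == t) := by
  induction l with
  | nil => simp
  | cons a l ih =>
      rw [List.filter_cons]
      by_cases hak : a.1 = k
      · rw [if_neg (by simp [hak])]
        rw [ih]
        by_cases htk : t = k
        · simp [htk]
        · rw [if_neg htk, List.find?_cons_of_neg (by simp [hak, Ne.symm htk]), if_neg htk]
      · rw [if_pos (by simp [hak])]
        by_cases hat : a.1 = t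
        · have htk : t ≠ k := fun h => hak (hat.trans h)
          rw [List.find?_cons_of_pos (by simp [hat]), if_neg htk,
            List.find?_cons_of_pos (by simp [hat])]
        · rw [List.find?_cons_of_neg (by simp [hat]), ih]
          by_cases htk : t = k
          · simp [htk]
          · rw [if_neg htk, if_neg htk, List.find?_cons_of_neg (by simp [hat])]

theorem pvGet?_erase (d : PySem.Dict (List Int) Int) (k t : List Int) :
    (d.erase k).get? t = if t = k then none else d.get? t := by
  obtain ⟨l⟩ := d
  simp only [PySem.Dict.erase, PySem.Dict.get?]
  rw [pvFind?_filter]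
  by_cases htk : t = k <;> simp [htk]

theorem pvGet?_erase_foldl (ks : List (List Int)) (d : PySem.Dict (List Int) Int) (t : List Int) :
    ((ks.foldl (fun d k => d.erase k) d).get? t) = if t ∈ ks then none else d.get? t := by
  induction ks generalizing d with
  | nil => simp
  | cons k ks ih =>
      rw [List.foldl_cons, ih, pvGet?_erase]
      by_cases h1 : t ∈ ks
      · simp [h1]
      · by_cases h2 : t = k <;> simp [h1, h2]

theorem pvGroups_getD_gen (l : List (List Int)) (g : PySem.Dict (List Int) (List (List Int)))
    (k : List Int) :
    (l.foldl (fun g t => g.insert (pvKeyB t) (g.getD (pvKeyB t) [] ++ [t])) g).getD k [] =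
      g.getD k [] ++ l.filter (fun t => pvKeyB t == k) := by
  induction l generalizing g with
  | nil => simp
  | cons a l ih =>
      rw [List.foldl_cons, ih, List.filter_cons]
      by_cases h : pvKeyB a = k
      · rw [PySem.Dict.getD_insert]
        simp [h]
      · rw [PySem.Dict.getD_insert, if_neg (fun hh => h hh.symm)]
        simp [h]

theorem pvGroups_getD (sat : List (List Int)) (cl : List Int) :
    (pvGroups sat).getD (pvKeyB cl) [] = pvMembers sat cl := by
  unfold pvGroups pvMembers
  rw [pvGroups_getD_gen]
  simp

theorem pvLength_pvVariant (cl : List Int) (s : Nat) : (pvVariant cl s).length = cl.length := by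
  simp [pvVariant]

theorem pvLength_pvKeyB (cl : List Int) : (pvKeyB cl).length = cl.length := by
  simp [pvKeyB]

theorem pvGetElem_pvVariant (cl : List Int) (s : Nat) (i : Nat) (h : i < cl.length) :
    (pvVariant cl s)[i]'(by simp [pvLength_pvVariant, h]) =
      if s.testBit i then cl[i]'(h) else -(cl[i]'(h)) := by
  simp [pvVariant, h]

theorem pvVariant_getD (cl : List Int) (s : Nat) (i : Nat) (h : i < cl.length) :
    (pvVariant cl s).getD i 0 = if s.testBit i then cl.getD i 0 else -(cl.getD i 0) := by
  rw [List.getD_eq_getElem _ 0 (by simp [pvLength_pvVariant, h] : i < (pvVariant cl s).length),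
    pvGetElem_pvVariant cl s i h, List.getD_eq_getElem _ 0 h]

theorem pvKeyB_pvVariant (cl : List Int) (s : Nat) : pvKeyB (pvVariant cl s) = pvKeyB cl := by
  apply List.ext_getElem
  · simp [pvKeyB, pvLength_pvVariant]
  · intro i h1 h2
    simp only [pvKeyB, List.getElem_map]
    rw [pvGetElem_pvVariant cl s i (by simpa [pvKeyB, pvLength_pvVariant] using h1)]
    by_cases hb : s.testBit i <;> simp [hb, abs_neg]

theorem pvKeyB_eq_elim (t cl : List Int) (h : pvKeyB t = pvKeyB cl) :
    t.length = cl.length ∧ ∀ i (h1 : i < t.length) (h2 : i < cl.length),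
      t[i] = cl[i] ∨ t[i] = -cl[i] := by
  have hlen : t.length = cl.length := by
    have := congrArg List.length h
    simpa [pvKeyB] using this
  refine ⟨hlen, fun i h1 h2 => ?_⟩
  have : |t[i]| = |cl[i]| := by
    have := congrArg (fun (l : List Int) => l[i]?) h
    simp only [pvKeyB, List.getElem?_map] at this
    rw [List.getElem?_eq_getElem h1, List.getElem?_eq_getElem h2] at this
    simpa using this
  exact abs_eq_abs.mp this

def pvBits : List Bool → Nat
  | [] => 0
  | b :: r => (if b then 1 else 0) + 2 * pvBits r

theorem pvBits_lt (bs : List Bool) : pvBits bs < 2 ^ bs.length := by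
  induction bs with
  | nil => simp [pvBits]
  | cons b r ih =>
      simp only [pvBits, List.length_cons, pow_succ]
      by_cases hb : b <;> simp [hb] <;> omega

theorem pvTestBit_pvBits (bs : List Bool) (i : Nat) :
    (pvBits bs).testBit i = bs.getD i false := by
  induction bs generalizing i with
  | nil => simp [pvBits]
  | cons b r ih =>
      cases i with
      | zero =>
          rw [Nat.testBit_zero]
          by_cases hb : b <;> simp [pvBits, hb, Nat.add_mul_mod_self_left]
      | succ i =>
          rw [Nat.testBit_succ]
          have : ((if b then 1 else 0) + 2 * pvBits r) / 2 = pvBits r := by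
            by_cases hb : b <;> simp [hb] <;> omega
          simp only [pvBits, this, ih]
          simp [List.getD]

theorem pvMem_pvVariants_of_key_eq (t cl : List Int) (h : pvKeyB t = pvKeyB cl) :
    t ∈ pvVariants cl := by
  obtain ⟨hlen, helt⟩ := pvKeyB_eq_elim t cl h
  set bs : List Bool := (List.range cl.length).map
    (fun i => decide (t.getD i 0 = cl.getD i 0)) with hbs
  have hbslen : bs.length = cl.length := by simp [hbs]
  refine List.mem_map.mpr ⟨pvBits bs, List.mem_range.mpr (by
    have := pvBits_lt bs; rwa [hbslen] at this), ?_⟩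
  apply List.ext_getElem
  · simp [pvLength_pvVariant, hlen]
  · intro i h1 h2
    have hic : i < cl.length := by simpa [pvLength_pvVariant] using h1
    have hit : i < t.length := by omega
    have hL : (pvVariant cl (pvBits bs))[i]'(h1) = (pvVariant cl (pvBits bs)).getD i 0 :=
      (List.getD_eq_getElem _ 0 h1).symm
    rw [hL, pvVariant_getD cl (pvBits bs) i hic, pvTestBit_pvBits]
    have hgd : bs.getD i false = decide (t.getD i 0 = cl.getD i 0) := by
      rw [hbs, List.getD_eq_getElem _ _ (by simpa using hic)]
      simp
    rw [hgd, List.getD_eq_getElem t 0 hit, List.getD_eq_getElem cl 0 hic]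
    by_cases he : t[i] = cl[i]
    · simp [he]
    · have := helt i hit hic
      simp [he]
      omega

theorem pvNodup_pvVariants (cl : List Int) (hnz : ∀ x ∈ cl, x ≠ 0) : (pvVariants cl).Nodup := by
  apply List.Nodup.map_on _ (List.nodup_range)
  intro s hs s' hs' heq
  rw [List.mem_range] at hs hs'
  apply Nat.eq_of_testBit_eq
  intro i
  by_cases hi : i < cl.length
  · by_contra hne
    have h1 : (pvVariant cl s).getD i 0 = (pvVariant cl s').getD i 0 := by rw [heq]
    rw [pvVariant_getD cl s i hi, pvVariant_getD cl s' i hi] at h1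
    have hz : cl.getD i 0 ≠ 0 := by
      rw [List.getD_eq_getElem _ 0 hi]
      exact hnz _ (List.getElem_mem hi)
    cases hb : s.testBit i <;> cases hb' : s'.testBit i <;> rw [hb, hb'] at h1 hne
    · exact hne rfl
    · rw [if_neg (by simp), if_pos rfl] at h1
      exact hz (by omega)
    · rw [if_pos rfl, if_neg (by simp)] at h1
      exact hz (by omega)
    · exact hne rfl
  · have h2 : (2 : Nat) ^ cl.length ≤ 2 ^ i := Nat.pow_le_pow_right (by norm_num) (by omega)
    rw [Nat.testBit_lt_two_pow (by omega), Nat.testBit_lt_two_pow (by omega)]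

theorem pvMembers_subset (sat : List (List Int)) (cl : List Int) :
    pvMembers sat cl ⊆ pvVariants cl := by
  intro t ht
  unfold pvMembers at ht
  have := List.of_mem_filter ht
  exact pvMem_pvVariants_of_key_eq t cl (by simpa using this)

theorem pvNodup_pvMembers (sat : List (List Int)) (cl : List Int) : (pvMembers sat cl).Nodup :=
  (pvNodup_keys_pvD0 sat).filter _

theorem pvLength_pvVariants (cl : List Int) : (pvVariants cl).length = 2 ^ cl.length := by
  simp [pvVariants]

theorem pvPerm_of_length (sat : List (List Int)) (cl : List Int)
    (hlen : (pvMembers sat cl).length = 2 ^ cl.length) :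
    (pvVariants cl).Perm (pvMembers sat cl) := by
  have hsub : (pvMembers sat cl).Subperm (pvVariants cl) :=
    List.subperm_of_subset (pvNodup_pvMembers sat cl) (pvMembers_subset sat cl)
  exact (hsub.perm_of_length_le (by rw [pvLength_pvVariants, hlen])).symm

theorem pvPerm_of_complete (sat : List (List Int)) (cl : List Int) (hnz : ∀ x ∈ cl, x ≠ 0)
    (hall : ∀ v ∈ pvVariants cl, v ∈ (pvD0 sat).keys) :
    (pvVariants cl).Perm (pvMembers sat cl) := by
  have h1 : (pvVariants cl).Subperm (pvMembers sat cl) := by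
    apply List.subperm_of_subset (pvNodup_pvVariants cl hnz)
    intro v hv
    unfold pvMembers
    apply List.mem_filter.mpr
    refine ⟨hall v hv, ?_⟩
    obtain ⟨s, _, rfl⟩ := List.mem_map.mp hv
    simp [pvKeyB_pvVariant]
  have h2 : (pvMembers sat cl).Subperm (pvVariants cl) :=
    List.subperm_of_subset (pvNodup_pvMembers sat cl) (pvMembers_subset sat cl)
  exact h1.antisymm h2

theorem pvAStates_eq (d : PySem.Dict (List Int) Int) (cl : List Int) (states : List Nat)
    (core : List Int) :
    pvAStates d cl states core =
      if states.all (fun s => (d.get? (pvVariant cl s)).isSome) then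
        some (core ++ states.map (fun s => (d.get? (pvVariant cl s)).getD 0))
      else none := by
  induction states generalizing core with
  | nil => simp [pvAStates]
  | cons s rest ih =>
      cases h : d.get? (pvVariant cl s) with
      | none => simp [pvAStates, h]
      | some j => simp [pvAStates, h, ih, List.append_assoc]

theorem pvMem_sat_of_mem_keys (sat : List (List Int)) (t : List Int)
    (h : t ∈ (pvD0 sat).keys) : t ∈ sat := by
  have hne : (pvD0 sat).get? t ≠ none :=
    fun hn => ((PySem.Dict.get?_eq_none_iff_not_mem_keys _ _).mp hn) h
  obtain ⟨i, hi⟩ := Option.ne_none_iff_exists'.mp hne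
  obtain ⟨n, rfl, hn⟩ := pvGet?_pvD0_spec sat t i hi
  exact List.mem_of_getElem? hn

theorem pvLoop (sat : List (List Int))
    (hPre : ∀ cl ∈ sat, (0 : Int) ∈ cl → ∃ s < 2 ^ cl.length, pvVariant cl s ∉ sat) :
    ∀ (rest : List (List Int)) (d : PySem.Dict (List Int) Int)
      (em : PySem.Set (List Int)) (cores : List (List Int)),
    (∀ cl ∈ rest, cl ∈ sat) →
    (∀ t : List Int, d.get? t = if pvKeyB t ∈ em then none else (pvD0 sat).get? t) →
    (rest.foldl (pvStepA sat) (d, cores)).2 = (rest.foldl (pvStepB sat) (cores, em)).1 := by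
  intro rest
  induction rest with
  | nil => intro d em cores _ _; rfl
  | cons a rest ih =>
    intro d em cores hrest hinv
    have ha : a ∈ sat := hrest a (by simp)
    have hrest' : ∀ cl ∈ rest, cl ∈ sat := fun cl h => hrest cl (by simp [h])
    rw [List.foldl_cons, List.foldl_cons]
    by_cases hem : pvKeyB a ∈ em
    · -- emitted group: A's very first state lookup misses, B skips by the emitted set
      have hA : pvStepA sat (d, cores) a = (d, cores) := by
        unfold pvStepA
        rw [pvAStates_eq]
        have h0 : (0 : Nat) ∈ List.range (2 ^ a.length) :=
          List.mem_range.mpr (Nat.two_pow_pos a.length)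
        have hv0 : d.get? (pvVariant a 0) = none := by
          rw [hinv, pvKeyB_pvVariant]
          simp [hem]
        rw [List.all_eq_false.mpr ⟨0, h0, by simp [hv0]⟩]
        simp
      have hB : pvStepB sat (cores, em) a = (cores, em) := by
        unfold pvStepB
        rw [if_pos ((PySem.Set.contains_iff em (pvKeyB a)).mpr hem)]
      rw [hA, hB]
      exact ih d em cores hrest' hinv
    · have hcontains : ¬ (PySem.Set.contains em (pvKeyB a) = true) :=
        fun h => hem ((PySem.Set.contains_iff em (pvKeyB a)).mp h)
      have hgetagree : ∀ t, pvKeyB t = pvKeyB a → d.get? t = (pvD0 sat).get? t := by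
        intro t ht
        rw [hinv, ht]
        simp [hem]
      by_cases hcomp : (pvMembers sat a).length = 2 ^ a.length
      · -- the group is complete: both sides fire and emit the same sorted core
        have hperm : (pvVariants a).Perm (pvMembers sat a) := pvPerm_of_length sat a hcomp
        have hkeys : ∀ v ∈ pvVariants a, v ∈ (pvD0 sat).keys := fun v hv =>
          List.mem_of_mem_filter (hperm.mem_iff.mp hv)
        have hsome : ∀ s ∈ List.range (2 ^ a.length), (d.get? (pvVariant a s)).isSome = true := by
          intro s hs
          have hv : pvVariant a s ∈ pvVariants a := List.mem_map.mpr ⟨s, hs, rfl⟩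
          rw [hgetagree _ (pvKeyB_pvVariant a s)]
          rw [Option.isSome_iff_ne_none]
          intro hn
          exact ((PySem.Dict.get?_eq_none_iff_not_mem_keys _ _).mp hn) (hkeys _ hv)
        set core := (List.range (2 ^ a.length)).map (fun s => (d.get? (pvVariant a s)).getD 0)
          with hcore
        have hA : pvStepA sat (d, cores) a =
            (core.foldl (fun d' i => d'.erase ((PySem.List.pyGet? sat i).getD [])) d,
             cores ++ [PySem.List.sorted core (fun x => x)]) := by
          unfold pvStepA
          rw [pvAStates_eq, List.all_eq_true.mpr hsome]
          simp [← hcore]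
        have hcorev : core = (pvVariants a).map (fun t => (pvD0 sat).getD t 0) := by
          rw [hcore]
          unfold pvVariants
          rw [List.map_map]
          apply List.map_congr_left
          intro s hs
          simp only [Function.comp]
          rw [hgetagree _ (pvKeyB_pvVariant a s), PySem.Dict.getD_eq_get?_getD]
        have hBcond : (((pvGroups sat).getD (pvKeyB a) []).length == 2 ^ (pvKeyB a).length)
            = true := by
          rw [pvGroups_getD, pvLength_pvKeyB]
          exact Nat.beq_eq_true_eq _ _ ▸ hcomp
        have hB : pvStepB sat (cores, em) a =
            (cores ++ [PySem.List.sorted ((pvMembers sat a).map (fun t => (pvD0 sat).getD t 0))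
                (fun x => x)],
             PySem.Set.add em (pvKeyB a)) := by
          unfold pvStepB
          rw [if_neg hcontains, if_pos hBcond, pvGroups_getD]
        rw [hA, hB]
        have hsorted : PySem.List.sorted core (fun x => x) =
            PySem.List.sorted ((pvMembers sat a).map (fun t => (pvD0 sat).getD t 0))
              (fun x => x) := by
          rw [hcorev]
          exact PySem.List.sorted_eq_sorted_of_perm _ _ _ (fun x y h => h) (hperm.map _)
        rw [hsorted]
        -- re-establish the dictionary invariant after the deletions
        have hback : ∀ v ∈ pvVariants a,
            (PySem.List.pyGet? sat ((pvD0 sat).getD v 0)).getD [] = v := by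
          intro v hv
          have hvk : v ∈ (pvD0 sat).keys := hkeys v hv
          have hne : (pvD0 sat).get? v ≠ none :=
            fun hn => ((PySem.Dict.get?_eq_none_iff_not_mem_keys _ _).mp hn) hvk
          obtain ⟨i, hi⟩ := Option.ne_none_iff_exists'.mp hne
          obtain ⟨n, rfl, hn⟩ := pvGet?_pvD0_spec sat v i hi
          rw [PySem.Dict.getD_eq_get?_getD, hi]
          simp [PySem.List.pyGet?_natCast, hn]
        have hmap : core.map (fun i => (PySem.List.pyGet? sat i).getD []) = pvVariants a := by
          rw [hcorev, List.map_map]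
          have : ∀ v ∈ pvVariants a,
              ((fun i => (PySem.List.pyGet? sat i).getD []) ∘ (fun t => (pvD0 sat).getD t 0)) v
                = v := fun v hv => hback v hv
          rw [List.map_congr_left this]
          simp
        apply ih _ _ _ hrest'
        intro t
        have hd' : (core.foldl (fun d' i => d'.erase ((PySem.List.pyGet? sat i).getD [])) d).get? t
            = if t ∈ pvVariants a then none else d.get? t := by
          rw [← List.foldl_map (f := fun i => (PySem.List.pyGet? sat i).getD [])
            (g := fun d' k => PySem.Dict.erase d' k), hmap, pvGet?_erase_foldl]
        rw [hd']
        by_cases ht : t ∈ pvVariants a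
        · have hkt : pvKeyB t = pvKeyB a := by
            obtain ⟨s, _, rfl⟩ := List.mem_map.mp ht
            exact pvKeyB_pvVariant a s
          rw [if_pos ht, if_pos ((PySem.Set.mem_add em (pvKeyB a) (pvKeyB t)).mpr (Or.inr hkt))]
        · rw [if_neg ht, hinv t]
          by_cases h1 : pvKeyB t ∈ em
          · rw [if_pos h1, if_pos ((PySem.Set.mem_add em (pvKeyB a) (pvKeyB t)).mpr (Or.inl h1))]
          · rw [if_neg h1]
            by_cases h2 : pvKeyB t = pvKeyB a
            · exact absurd (pvMem_pvVariants_of_key_eq t a h2) ht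
            · rw [if_neg (fun hmem => by
                rcases (PySem.Set.mem_add em (pvKeyB a) (pvKeyB t)).mp hmem with h | h
                · exact h1 h
                · exact h2 h)]
      · -- the group is incomplete: some variant is missing, both sides skip
        have hBcond : (((pvGroups sat).getD (pvKeyB a) []).length == 2 ^ (pvKeyB a).length)
            = false := by
          rw [pvGroups_getD, pvLength_pvKeyB]
          exact beq_eq_false_iff_ne.mpr hcomp
        have hB : pvStepB sat (cores, em) a = (cores, em) := by
          unfold pvStepB
          rw [if_neg hcontains, hBcond]
          simp
        have hmiss : ∃ s ∈ List.range (2 ^ a.length), ¬ (d.get? (pvVariant a s)).isSome = true := by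
          by_contra hno
          push_neg at hno
          have hall : ∀ v ∈ pvVariants a, v ∈ (pvD0 sat).keys := by
            intro v hv
            obtain ⟨s, hs, rfl⟩ := List.mem_map.mp hv
            have h3 := hno s hs
            rw [hgetagree _ (pvKeyB_pvVariant a s), Option.isSome_iff_ne_none] at h3
            by_contra hnk
            exact h3 ((PySem.Dict.get?_eq_none_iff_not_mem_keys _ _).mpr hnk)
          by_cases hz : (0 : Int) ∈ a
          · obtain ⟨s, hs, hnot⟩ := hPre a ha hz
            exact hnot (pvMem_sat_of_mem_keys sat _
              (hall _ (List.mem_map.mpr ⟨s, List.mem_range.mpr hs, rfl⟩)))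
          · have hnz : ∀ x ∈ a, x ≠ 0 := fun x hx h0 => hz (h0 ▸ hx)
            have := (pvPerm_of_complete sat a hnz hall).length_eq
            rw [pvLength_pvVariants] at this
            exact hcomp this.symm
        have hA : pvStepA sat (d, cores) a = (d, cores) := by
          unfold pvStepA
          rw [pvAStates_eq]
          obtain ⟨s, hs, hfalse⟩ := hmiss
          rw [List.all_eq_false.mpr ⟨s, hs, hfalse⟩]
          simp
        rw [hA, hB]
        exact ih d em cores hrest' hinv

-- ===== VERDICT (by name: the statement is the Claim_ definition above) =====
theorem unsatcore_detect_spec : Claim_equal_unsatcore_detect := by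
  intro vars_num sat _ hPre
  unfold Spec_unsatcore_detect
  rw [pvPortA_eq, pvPortB_eq]
  exact pvLoop sat hPre sat (pvD0 sat) PySem.Set.empty [] (fun cl h => h)
    (fun t => by simp [PySem.Set.empty])

theorem unsatcore_detect_raises : Claim_raises_unsatcore_detect := by
  unfold Claim_raises_unsatcore_detect
  refine ⟨?_, by decide⟩
  intro vars_num sat _ ⟨cl, hcl, hz, hall⟩ hpre
  obtain ⟨s, hs, hnot⟩ := hpre cl hcl hz
  exact hnot (hall s hs)

-- self-check: B's port really returns the stated value at the raise witness
theorem pvRaiseWitness_ok :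
    unsatcore_detect_alt pvRaiseWitness_unsatcore_detect.1 pvRaiseWitness_unsatcore_detect.2 =
      pvRaiseWitnessOut_unsatcore_detect := by
  have h := unsatcore_detect_raises
  unfold Claim_raises_unsatcore_detect at h
  exact h.2.2.2
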